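-- pv_equiv track=rewrite | github.com/TheTridentGuy/AoCGallery2024 | code/day2.py | isbad
-- ===== SOURCE A (Python) =====
-- def isbad(line2):
--     b2=line2.copy()
--     line2.sort()
--     bad2 = True
--     if line2==b2 or line2[::-1]==b2:
--         bad2 = False
--         for it2 in range(len(b2) - 1):
--             if abs(b2[it2] - b2[it2 + 1]) > 3 or abs(b2[it2] - b2[it2 + 1]) < 1:
--                 bad2 = True
--     return bad2
-- ===== SOURCE B (Python) =====
-- def isbad(line2):
--     # One linear pass over adjacent pairs (does not mutate line2;
--     # A sorts its argument in place -- return value is the same).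
--     pairs = list(zip(line2, line2[1:]))
--     asc = all(1 <= b - a <= 3 for a, b in pairs)
--     desc = all(1 <= a - b <= 3 for a, b in pairs)
--     return not (asc or desc)
-- ===== Notes on version B (the rewrite author's own statement) =====
-- stated objective: faster
-- what changed: Replaces copy+in-place sort+reversed-slice comparisons plus an index loop by one linear pass over adjacent pairs checking strict monotone steps of size 1 to 3 in either direction; B also does not mutate its argument.
import Mathlib
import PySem

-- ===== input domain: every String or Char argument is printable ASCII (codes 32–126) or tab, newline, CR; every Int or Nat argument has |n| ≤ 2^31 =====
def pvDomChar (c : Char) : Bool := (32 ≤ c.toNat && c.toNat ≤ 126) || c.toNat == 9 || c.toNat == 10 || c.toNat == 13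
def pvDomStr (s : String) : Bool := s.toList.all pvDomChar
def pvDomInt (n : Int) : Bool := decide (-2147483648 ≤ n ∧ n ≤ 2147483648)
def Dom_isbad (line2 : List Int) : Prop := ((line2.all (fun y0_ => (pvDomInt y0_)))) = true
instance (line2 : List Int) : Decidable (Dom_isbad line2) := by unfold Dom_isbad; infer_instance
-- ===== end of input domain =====

-- B replaces sort-and-compare by one linear adjacent-pair pass (faster, asymptotic);
-- A sorts its argument in place, B does not mutate: equivalence is about the return value.

-- ===== PORT A =====
def isbad (line2 : List Int) : Bool :=
  let b2 := line2                                         -- b2 = line2.copy()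
  let line2s := PySem.List.sorted line2 (fun x => x) false  -- line2.sort()
  -- bad2 = True; if line2==b2 or line2[::-1]==b2: bad2=False; loop  (line2[::-1] never raises: slice? is always some here)
  if line2s == b2 || ((PySem.List.slice? line2s none none (-1)).getD []) == b2 then
    (PySem.List.pyRange 0 ((b2.length : Int) - 1) 1).foldl
      (fun bad2 it2 =>
        if 3 < (PySem.List.pyGetD b2 it2 0 - PySem.List.pyGetD b2 (it2 + 1) 0).natAbs
           ∨ (PySem.List.pyGetD b2 it2 0 - PySem.List.pyGetD b2 (it2 + 1) 0).natAbs < 1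
        then true else bad2)
      false
  else true

-- ===== PORT B =====
def isbad_alt (line2 : List Int) : Bool :=
  let pairs := line2.zip (line2.drop 1)                   -- zip(line2, line2[1:])
  let asc := pairs.all fun p => decide (1 ≤ p.2 - p.1 ∧ p.2 - p.1 ≤ 3)
  let desc := pairs.all fun p => decide (1 ≤ p.1 - p.2 ∧ p.1 - p.2 ≤ 3)
  !(asc || desc)

-- ===== PRECONDITION & SPEC =====
def Spec_isbad (line2 : List Int) (out : Bool) : Prop := out = isbad_alt line2
instance (line2 : List Int) (out : Bool) : Decidable (Spec_isbad line2 out) := by unfold Spec_isbad; infer_instance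

-- ===== CLAIM (what is proved, stated in full; the proofs are below) =====
def Claim_equal_isbad : Prop := ∀ (line2 : List Int), Dom_isbad line2 → Spec_isbad line2 (isbad line2)

-- ===== LEMMAS AND PROOFS =====

-- A's accumulator only ever gets set to true: the loop is an 'any'.
theorem foldl_set_true (P : Int → Prop) [DecidablePred P] (xs : List Int) (b : Bool) :
    xs.foldl (fun acc x => if P x then true else acc) b = (b || xs.any fun x => decide (P x)) := by
  induction xs generalizing b with
  | nil => simp
  | cons x xs ih =>
      simp only [List.foldl_cons, List.any_cons, ih]
      by_cases h : P x <;> simp [h]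

-- B's 'all' over zip(l, l[1:]) says exactly: every adjacent pair satisfies P.
theorem zip_all_iff (P : Int → Int → Prop) [∀ a b, Decidable (P a b)] (l : List Int) :
    (((l.zip (l.drop 1)).all fun p => decide (P p.1 p.2)) = true ↔
      ∀ i (_ : i + 1 < l.length), P l[i] l[i + 1]) := by
  simp only [List.all_eq_true, decide_eq_true_eq]
  constructor
  · intro h i hi
    have hm : (l[i], l[i+1]) ∈ l.zip (l.drop 1) := by
      have hlen : i < (l.zip (l.drop 1)).length := by
        simp [List.length_zip]; omega
      have : (l.zip (l.drop 1))[i] = (l[i], l[i+1]) := by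
        simp [List.getElem_zip]
      rw [← this]; exact List.getElem_mem hlen
    exact h _ hm
  · intro h p hp
    obtain ⟨i, hi, rfl⟩ := List.mem_iff_getElem.mp hp
    have hi' : i + 1 < l.length := by
      simp [List.length_zip] at hi; omega
    have : (l.zip (l.drop 1))[i] = (l[i], l[i+1]) := by
      simp [List.getElem_zip]
    rw [this]; exact h i hi'

-- A's 'any' over range(len(l)-1) says: some adjacent pair is bad.
theorem range_any_iff (l : List Int) (P : Int → Int → Prop) [∀ a b, Decidable (P a b)] :
    (((PySem.List.pyRange 0 ((l.length : Int) - 1) 1).any fun it2 =>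
        decide (P (PySem.List.pyGetD l it2 0) (PySem.List.pyGetD l (it2 + 1) 0))) = true ↔
      ∃ i, ∃ _ : i + 1 < l.length, P l[i] l[i + 1]) := by
  rw [PySem.List.pyRange_one]
  simp only [List.any_map, List.any_eq_true, List.mem_range, Function.comp,
    decide_eq_true_eq]
  constructor
  · rintro ⟨k, hk, hP⟩
    have hk1 : k + 1 < l.length := by omega
    refine ⟨k, hk1, ?_⟩
    have e1 : (0 : Int) + (k : Int) = ((k : Nat) : Int) := by ring
    have e2 : ((k : Int)) + 1 = (((k + 1 : Nat)) : Int) := by push_cast; ring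
    rw [e1, e2, PySem.List.pyGetD_natCast, PySem.List.pyGetD_natCast] at hP
    rwa [List.getD_eq_getElem l 0 (by omega), List.getD_eq_getElem l 0 hk1] at hP
  · rintro ⟨i, hi, hP⟩
    refine ⟨i, by omega, ?_⟩
    have e1 : (0 : Int) + (i : Int) = ((i : Nat) : Int) := by ring
    have e2 : ((i : Int)) + 1 = (((i + 1 : Nat)) : Int) := by push_cast; ring
    rw [e1, e2, PySem.List.pyGetD_natCast, PySem.List.pyGetD_natCast,
      List.getD_eq_getElem l 0 (by omega), List.getD_eq_getElem l 0 hi]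
    exact hP

-- adjacent condition for a transitive relation gives Pairwise
theorem pairwise_of_adj (R : Int → Int → Prop) (ht : ∀ a b c : Int, R a b → R b c → R a c) (l : List Int)
    (h : ∀ i (_ : i + 1 < l.length), R l[i] l[i + 1]) : l.Pairwise R := by
  haveI : Trans R R R := ⟨fun hab hbc => ht _ _ _ hab hbc⟩
  rw [← List.isChain_iff_pairwise]
  exact List.isChain_iff_getElem.mpr h

theorem pairwise_le_adj (l : List Int) (h : l.Pairwise (· ≤ ·)) :
    ∀ i (_ : i + 1 < l.length), l[i] ≤ l[i + 1] := by
  intro i hi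
  exact List.pairwise_iff_getElem.mp h i (i + 1) (by omega) hi (by omega)

theorem main_eq (l : List Int) : isbad l = isbad_alt l := by
  unfold isbad isbad_alt
  simp only [PySem.List.slice?_none_none_neg_one, Option.getD_some,
    foldl_set_true, Bool.false_or]
  set A := (fun p : Int × Int => decide (1 ≤ p.2 - p.1 ∧ p.2 - p.1 ≤ 3)) with hA
  set D := (fun p : Int × Int => decide (1 ≤ p.1 - p.2 ∧ p.1 - p.2 ≤ 3)) with hD
  by_cases hasc : ((l.zip (l.drop 1)).all A) = true
  · -- strictly ascending with steps in [1,3]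
    have hadj := (zip_all_iff (fun a b => 1 ≤ b - a ∧ b - a ≤ 3) l).mp (hA ▸ hasc)
    have hlt : l.Pairwise (· < ·) :=
      pairwise_of_adj (· < ·) (fun _ _ _ hab hbc => lt_trans hab hbc) l
        (fun i hi => by have := hadj i hi; omega)
    have hs : PySem.List.sorted l (fun x => x) false = l :=
      PySem.List.sorted_eq_of_perm_of_pairwise_lt l l (fun x => x) (List.Perm.refl l) hlt
    rw [hs]
    have hcond : ((l == l) || (l.reverse == l)) = true := by simp
    rw [if_pos hcond]
    simp only [hasc, Bool.true_or, Bool.not_true]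
    rw [Bool.eq_false_iff]
    intro hany
    rw [range_any_iff l (fun a b => 3 < (a - b).natAbs ∨ (a - b).natAbs < 1)] at hany
    obtain ⟨i, hi, hP⟩ := hany
    have := hadj i hi; omega
  · by_cases hdesc : ((l.zip (l.drop 1)).all D) = true
    · -- strictly descending with steps in [1,3]
      have hadj := (zip_all_iff (fun a b => 1 ≤ a - b ∧ a - b ≤ 3) l).mp (hD ▸ hdesc)
      have hgt : l.reverse.Pairwise (· < ·) := by
        rw [List.pairwise_reverse]
        exact pairwise_of_adj (fun a b => b < a) (fun _ _ _ hab hbc => lt_trans hbc hab) l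
          (fun i hi => by have := hadj i hi; omega)
      have hs : PySem.List.sorted l (fun x => x) false = l.reverse :=
        PySem.List.sorted_eq_of_perm_of_pairwise_lt l l.reverse (fun x => x)
          (List.reverse_perm l) hgt
      rw [hs, List.reverse_reverse]
      have hcond : ((l.reverse == l) || (l == l)) = true := by simp
      rw [if_pos hcond]
      simp only [hdesc, Bool.or_true, Bool.not_true]
      rw [Bool.eq_false_iff]
      intro hany
      rw [range_any_iff l (fun a b => 3 < (a - b).natAbs ∨ (a - b).natAbs < 1)] at hany
      obtain ⟨i, hi, hP⟩ := hany
      have := hadj i hi; omega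
    · -- neither: B returns true; show A does too
      simp only [hasc, hdesc, Bool.or_self, Bool.not_false]
      by_cases hg : ((PySem.List.sorted l (fun x => x) false == l)
          || ((PySem.List.sorted l (fun x => x) false).reverse == l)) = true
      · rw [if_pos hg]
        rw [range_any_iff l (fun a b => 3 < (a - b).natAbs ∨ (a - b).natAbs < 1)]
        by_contra hno
        push Not at hno
        have hgood : ∀ i (_ : i + 1 < l.length),
            1 ≤ (l[i] - l[i + 1]).natAbs ∧ (l[i] - l[i + 1]).natAbs ≤ 3 := by
          intro i hi
          have := hno i hi
          omega
        rcases Bool.or_eq_true_iff.mp hg with h | h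
        · -- sorted l = l: l is non-decreasing, so good steps force strict ascent
          have hgl : PySem.List.sorted l (fun x => x) false = l := by
            exact beq_iff_eq.mp h
          have hle : l.Pairwise (· ≤ ·) := by
            have := PySem.List.sorted_pairwise l (fun x => x) (κ := Int)
            rwa [hgl] at this
          exact hasc (hA ▸ (zip_all_iff (fun a b => 1 ≤ b - a ∧ b - a ≤ 3) l).mpr
            (fun i hi => by
              have h1 := pairwise_le_adj l hle i hi
              have h2 := hgood i hi
              omega))
        · -- (sorted l).reverse = l: l is non-increasing, so good steps force strict descent
          have hgl : (PySem.List.sorted l (fun x => x) false).reverse = l := by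
            exact beq_iff_eq.mp h
          have hle : l.Pairwise (fun a b => b ≤ a) := by
            have hp := PySem.List.sorted_pairwise l (fun x => x) (κ := Int)
            have hgl2 : PySem.List.sorted l (fun x => x) false = l.reverse := by
              have hc := congrArg List.reverse hgl
              simpa using hc
            have hrv : l.reverse.Pairwise (fun a b : Int => a ≤ b) := by
              rw [← hgl2]; exact hp
            rwa [List.pairwise_reverse] at hrv
          have hrev : ∀ i (_ : i + 1 < l.length), l[i + 1] ≤ l[i] := by
            intro i hi
            exact List.pairwise_iff_getElem.mp hle i (i + 1) (by omega) hi (by omega)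
          exact hdesc (hD ▸ (zip_all_iff (fun a b => 1 ≤ a - b ∧ a - b ≤ 3) l).mpr
            (fun i hi => by
              have h1 := hrev i hi
              have h2 := hgood i hi
              omega))
      · rw [if_neg hg]

-- ===== VERDICT (by name: the statement is the Claim_ definition above) =====
theorem isbad_spec : Claim_equal_isbad := by
  intro l _
  unfold Spec_isbad
  exact main_eq l
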